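-- pv_equiv track=rewrite | github.com/paul-heyse/CodeAnatomy | src/semantics/ir_pipeline.py | _infer_join_keys_from_fields
-- ===== SOURCE A (Python) =====
-- _SPAN_FIELD_NAMES: frozenset[str] = frozenset({"bstart", "bend"})
--
-- _FILE_IDENTITY_NAMES: frozenset[str] = frozenset({"file_id", "path"})
--
-- _SYMBOL_NAMES: frozenset[str] = frozenset({"symbol", "qname"})
--
-- def _infer_join_keys_from_fields(
--     left_fields: frozenset[str],
--     right_fields: frozenset[str],
-- ) -> tuple[tuple[str, str], ...] | None:
--     common = sorted(left_fields & right_fields)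
--     if not common:
--         return None
--     priority_groups = [_FILE_IDENTITY_NAMES, _SPAN_FIELD_NAMES, _SYMBOL_NAMES]
--     result: list[tuple[str, str]] = []
--     for group in priority_groups:
--         for name in sorted(group):
--             if name in left_fields and name in right_fields and (name, name) not in result:
--                 result.append((name, name))
--     for name in common:
--         if (name, name) not in result:
--             result.append((name, name))
--     return tuple(result) if result else None
-- ===== SOURCE B (Python) =====
-- def _infer_join_keys_from_fields(left_fields, right_fields):
--     common = left_fields & right_fields
--     if not common:
--         return None
--     rank = {"file_id": 0, "path": 1, "bend": 2, "bstart": 3, "qname": 4, "symbol": 5}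
--     buckets = [[] for _ in range(7)]
--     for name in sorted(common):
--         buckets[rank.get(name, 6)].append((name, name))
--     return tuple(pair for bucket in buckets for pair in bucket)
-- ===== Notes on version B (the rewrite author's own statement) =====
-- stated objective: faster
-- what changed: Replaces A's nested priority-group loops with membership scans of the growing result list (plus a second dedup pass over common) by a single-pass bucket distribution: one scan over sorted(common) drops each name into one of 7 rank buckets via a dict lookup, and the buckets are concatenated; no dedup scans remain.
import Mathlib
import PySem

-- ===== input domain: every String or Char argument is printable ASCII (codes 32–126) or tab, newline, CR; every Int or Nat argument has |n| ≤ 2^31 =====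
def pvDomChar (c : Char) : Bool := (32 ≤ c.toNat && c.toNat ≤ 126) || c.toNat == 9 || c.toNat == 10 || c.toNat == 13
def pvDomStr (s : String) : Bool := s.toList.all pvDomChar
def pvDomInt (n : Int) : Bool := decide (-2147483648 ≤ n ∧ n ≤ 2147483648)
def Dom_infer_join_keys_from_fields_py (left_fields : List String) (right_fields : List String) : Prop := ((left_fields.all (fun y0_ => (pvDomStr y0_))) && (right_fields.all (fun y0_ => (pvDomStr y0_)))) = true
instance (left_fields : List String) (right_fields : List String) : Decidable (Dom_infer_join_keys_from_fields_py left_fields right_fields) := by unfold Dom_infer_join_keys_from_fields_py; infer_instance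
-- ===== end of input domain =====

-- B replaces A's nested priority-group loops (with their membership scans of the growing result
-- list and a second dedup pass) by a single-pass bucket distribution over sorted(common);
-- objective: faster (a timing run measured B ≥ 59x faster at the largest completed size).

-- ===== PORT A =====
-- loop body of A's priority-group loop: 'if name in left and name in right and (name,name) not in result: result.append(...)'
def pvStepPrio (left_fields right_fields : List String) (res : List (String × String)) (name : String) : List (String × String) :=
  if left_fields.contains name && right_fields.contains name && !(res.contains (name, name)) then res ++ [(name, name)] else res

-- loop body of A's second loop: 'if (name,name) not in result: result.append(...)'
def pvStepDedup (res : List (String × String)) (name : String) : List (String × String) :=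
  if res.contains (name, name) then res else res ++ [(name, name)]

def infer_join_keys_from_fields_py (left_fields : List String) (right_fields : List String) : Option (List (String × String)) :=
  let common := PySem.List.sorted (PySem.Set.inter (PySem.Set.ofList left_fields) (PySem.Set.ofList right_fields)) (fun x => x) false
  if common.isEmpty then none
  else
    let priority_groups : List (List String) :=
      [PySem.Set.ofList ["file_id", "path"], PySem.Set.ofList ["bstart", "bend"], PySem.Set.ofList ["symbol", "qname"]]
    let result := priority_groups.foldl
      (fun res group => (PySem.List.sorted group (fun x => x) false).foldl (pvStepPrio left_fields right_fields) res) []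
    let result := common.foldl pvStepDedup result
    if result.isEmpty then none else some result

-- ===== PORT B =====
-- the dict 'rank' of Source B
def pvRank : PySem.Dict String Int :=
  PySem.Dict.ofList [("file_id", 0), ("path", 1), ("bend", 2), ("bstart", 3), ("qname", 4), ("symbol", 5)]

-- loop body of Source B: 'buckets[rank.get(name, 6)].append((name, name))'
def pvBucketStep (buckets : List (List (String × String))) (name : String) : List (List (String × String)) :=
  let k := PySem.Dict.getD pvRank name 6
  PySem.List.pySetD buckets k (PySem.List.pyGetD buckets k [] ++ [(name, name)])

def infer_join_keys_from_fields_py_alt (left_fields : List String) (right_fields : List String) : Option (List (String × String)) :=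
  let common := PySem.Set.inter (PySem.Set.ofList left_fields) (PySem.Set.ofList right_fields)
  if common.isEmpty then none
  else
    -- buckets = [[] for _ in range(7)]; one pass distributes sorted(common); flatten concatenates
    some (((PySem.List.sorted common (fun x => x) false).foldl pvBucketStep
      ((PySem.List.pyRange 0 7 1).map (fun _ => ([] : List (String × String))))).flatten)

-- ===== PRECONDITION & SPEC =====
def Spec_infer_join_keys_from_fields_py (left_fields : List String) (right_fields : List String) (out : Option (List (String × String))) : Prop := out = infer_join_keys_from_fields_py_alt left_fields right_fields
instance (left_fields : List String) (right_fields : List String) (out : Option (List (String × String))) : Decidable (Spec_infer_join_keys_from_fields_py left_fields right_fields out) := by unfold Spec_infer_join_keys_from_fields_py; infer_instance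

-- ===== CLAIM (what is proved, stated in full; the proofs are below) =====
def Claim_equal_infer_join_keys_from_fields_py : Prop := ∀ (left_fields : List String) (right_fields : List String), Dom_infer_join_keys_from_fields_py left_fields right_fields → Spec_infer_join_keys_from_fields_py left_fields right_fields (infer_join_keys_from_fields_py left_fields right_fields)

-- ===== LEMMAS AND PROOFS =====

-- A's priority loop, on a duplicate-free name list none of whose pairs is in the accumulator,
-- is the filter by membership in both field sets.
lemma fold_prio (l r : List String) (ns : List String) (R0 : List (String × String))
    (hnd : ns.Nodup) (hdis : ∀ n ∈ ns, (n, n) ∉ R0) :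
    ns.foldl (pvStepPrio l r) R0
      = R0 ++ (ns.filter (fun n => l.contains n && r.contains n)).map (fun n => (n, n)) := by
  induction ns generalizing R0 with
  | nil => simp
  | cons n ns ih =>
    have hn : n ∉ ns := (List.nodup_cons.mp hnd).1
    have hnd' : ns.Nodup := (List.nodup_cons.mp hnd).2
    have hR : (n, n) ∉ R0 := hdis n (by simp)
    by_cases hc : (l.contains n && r.contains n) = true
    · have h1 : n ∈ l := by simpa [List.contains_eq_mem] using (Bool.and_eq_true_iff.mp hc).1
      have h2 : n ∈ r := by simpa [List.contains_eq_mem] using (Bool.and_eq_true_iff.mp hc).2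
      have hstep : pvStepPrio l r R0 n = R0 ++ [(n, n)] := by
        simp [pvStepPrio, List.contains_eq_mem, h1, h2, hR]
      rw [List.foldl_cons, hstep, ih (R0 ++ [(n, n)]) hnd'
        (by
          intro m hm
          have hmn : m ≠ n := fun h => hn (h ▸ hm)
          simp [hmn, hdis m (List.mem_cons_of_mem _ hm)])]
      simp [h1, h2]
    · have hstep : pvStepPrio l r R0 n = R0 := by
        unfold pvStepPrio
        rw [if_neg]
        intro h
        exact hc (Bool.and_eq_true_iff.mp h).1
      rw [List.foldl_cons, hstep, ih R0 hnd' (fun m hm => hdis m (List.mem_cons_of_mem _ hm))]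
      have hnot : ¬(n ∈ l ∧ n ∈ r) := fun ⟨h1, h2⟩ => hc (by simp [List.contains_eq_mem, h1, h2])
      simp [hnot]

-- A's second loop, on a duplicate-free list, appends exactly the names whose pair is not yet present.
lemma fold_dedup (C : List String) (R0 : List (String × String)) (hnd : C.Nodup) :
    C.foldl pvStepDedup R0
      = R0 ++ (C.filter (fun n => !(R0.contains (n, n)))).map (fun n => (n, n)) := by
  induction C generalizing R0 with
  | nil => simp
  | cons n C ih =>
    have hn : n ∉ C := (List.nodup_cons.mp hnd).1
    have hnd' : C.Nodup := (List.nodup_cons.mp hnd).2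
    by_cases hc : (n, n) ∈ R0
    · have : pvStepDedup R0 n = R0 := by simp [pvStepDedup, List.contains_eq_mem, hc]
      rw [List.foldl_cons, this, ih R0 hnd']
      simp [List.contains_eq_mem, hc]
    · have : pvStepDedup R0 n = R0 ++ [(n, n)] := by simp [pvStepDedup, List.contains_eq_mem, hc]
      rw [List.foldl_cons, this, ih (R0 ++ [(n, n)]) hnd']
      have hfc : C.filter (fun m => !((R0 ++ [(n, n)]).contains (m, m)))
          = C.filter (fun m => !(R0.contains (m, m))) := by
        apply List.filter_congr
        intro m hm
        have hmn : m ≠ n := fun h => hn (h ▸ hm)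
        simp [List.contains_eq_mem, hmn]
      rw [hfc]
      simp [List.contains_eq_mem, hc, List.append_assoc]

-- pvRank as a literal association list
lemma pvRank_mk : pvRank = PySem.Dict.mk [("file_id", 0), ("path", 1), ("bend", 2), ("bstart", 3), ("qname", 4), ("symbol", 5)] := by decide

-- one bucket step on a name with no rank entry
lemma bucketStep_other (n : String) (h0 : n ≠ "file_id") (h1 : n ≠ "path") (h2 : n ≠ "bend")
    (h3 : n ≠ "bstart") (h4 : n ≠ "qname") (h5 : n ≠ "symbol")
    (b0 b1 b2 b3 b4 b5 b6 : List (String × String)) :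
    pvBucketStep [b0, b1, b2, b3, b4, b5, b6] n = [b0, b1, b2, b3, b4, b5, b6 ++ [(n, n)]] := by
  simp [pvBucketStep, PySem.Dict.getD_eq_get?_getD, pvRank_mk,
        (Ne.symm h0), (Ne.symm h1), (Ne.symm h2), (Ne.symm h3), (Ne.symm h4), (Ne.symm h5),
        PySem.Dict.get?, PySem.List.pySetD, PySem.List.pySet?, PySem.List.pyGetD, PySem.List.pyIdx?]

-- a filter by equality on a duplicate-free list is a singleton or empty
lemma filter_beq_nodup (l : List String) (hnd : l.Nodup) (c : String) :
    l.filter (· == c) = if c ∈ l then [c] else [] := by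
  induction l with
  | nil => simp
  | cons x l ih =>
    have hx : x ∉ l := (List.nodup_cons.mp hnd).1
    by_cases hxc : x = c
    · subst hxc
      simp [hx, ih (List.nodup_cons.mp hnd).2]
    · simp [hxc, ih (List.nodup_cons.mp hnd).2, Ne.symm hxc]

-- Source B's distribution loop, bucket by bucket
lemma fold_bucket (cs : List String) (b0 b1 b2 b3 b4 b5 b6 : List (String × String)) :
    cs.foldl pvBucketStep [b0, b1, b2, b3, b4, b5, b6] =
      [b0 ++ (cs.filter (· == "file_id")).map (fun n => (n, n)),
       b1 ++ (cs.filter (· == "path")).map (fun n => (n, n)),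
       b2 ++ (cs.filter (· == "bend")).map (fun n => (n, n)),
       b3 ++ (cs.filter (· == "bstart")).map (fun n => (n, n)),
       b4 ++ (cs.filter (· == "qname")).map (fun n => (n, n)),
       b5 ++ (cs.filter (· == "symbol")).map (fun n => (n, n)),
       b6 ++ (cs.filter (fun n => !((["file_id", "path", "bend", "bstart", "qname", "symbol"] : List String).contains n))).map (fun n => (n, n))] := by
  induction cs generalizing b0 b1 b2 b3 b4 b5 b6 with
  | nil => simp
  | cons n cs ih =>
    by_cases h0 : n = "file_id"
    · subst h0
      rw [List.foldl_cons,
        show pvBucketStep [b0, b1, b2, b3, b4, b5, b6] "file_id"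
            = [b0 ++ [("file_id", "file_id")], b1, b2, b3, b4, b5, b6] by
          simp [pvBucketStep, PySem.Dict.getD_eq_get?_getD, pvRank_mk,
                PySem.Dict.get?, PySem.List.pySetD, PySem.List.pySet?, PySem.List.pyGetD, PySem.List.pyIdx?],
        ih]
      simp
    · by_cases h1 : n = "path"
      · subst h1
        rw [List.foldl_cons,
          show pvBucketStep [b0, b1, b2, b3, b4, b5, b6] "path"
              = [b0, b1 ++ [("path", "path")], b2, b3, b4, b5, b6] by
            simp [pvBucketStep, PySem.Dict.getD_eq_get?_getD, pvRank_mk,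
                  PySem.Dict.get?, PySem.List.pySetD, PySem.List.pySet?, PySem.List.pyGetD, PySem.List.pyIdx?],
          ih]
        simp
      · by_cases h2 : n = "bend"
        · subst h2
          rw [List.foldl_cons,
            show pvBucketStep [b0, b1, b2, b3, b4, b5, b6] "bend"
                = [b0, b1, b2 ++ [("bend", "bend")], b3, b4, b5, b6] by
              simp [pvBucketStep, PySem.Dict.getD_eq_get?_getD, pvRank_mk,
                    PySem.Dict.get?, PySem.List.pySetD, PySem.List.pySet?, PySem.List.pyGetD, PySem.List.pyIdx?],
            ih]
          simp
        · by_cases h3 : n = "bstart"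
          · subst h3
            rw [List.foldl_cons,
              show pvBucketStep [b0, b1, b2, b3, b4, b5, b6] "bstart"
                  = [b0, b1, b2, b3 ++ [("bstart", "bstart")], b4, b5, b6] by
                simp [pvBucketStep, PySem.Dict.getD_eq_get?_getD, pvRank_mk,
                      PySem.Dict.get?, PySem.List.pySetD, PySem.List.pySet?, PySem.List.pyGetD, PySem.List.pyIdx?],
              ih]
            simp
          · by_cases h4 : n = "qname"
            · subst h4
              rw [List.foldl_cons,
                show pvBucketStep [b0, b1, b2, b3, b4, b5, b6] "qname"
                    = [b0, b1, b2, b3, b4 ++ [("qname", "qname")], b5, b6] by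
                  simp [pvBucketStep, PySem.Dict.getD_eq_get?_getD, pvRank_mk,
                        PySem.Dict.get?, PySem.List.pySetD, PySem.List.pySet?, PySem.List.pyGetD, PySem.List.pyIdx?],
                ih]
              simp
            · by_cases h5 : n = "symbol"
              · subst h5
                rw [List.foldl_cons,
                  show pvBucketStep [b0, b1, b2, b3, b4, b5, b6] "symbol"
                      = [b0, b1, b2, b3, b4, b5 ++ [("symbol", "symbol")], b6] by
                    simp [pvBucketStep, PySem.Dict.getD_eq_get?_getD, pvRank_mk,
                          PySem.Dict.get?, PySem.List.pySetD, PySem.List.pySet?, PySem.List.pyGetD, PySem.List.pyIdx?],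
                  ih]
                simp
              · rw [List.foldl_cons, bucketStep_other n h0 h1 h2 h3 h4 h5, ih]
                simp [h0, h1, h2, h3, h4, h5]

-- ===== VERDICT (by name: the statement is the Claim_ definition above) =====
theorem infer_join_keys_from_fields_py_spec : Claim_equal_infer_join_keys_from_fields_py := by
  intro l r _
  unfold Spec_infer_join_keys_from_fields_py infer_join_keys_from_fields_py infer_join_keys_from_fields_py_alt
  set CS := PySem.Set.inter (PySem.Set.ofList l) (PySem.Set.ofList r) with hCS
  set common := PySem.List.sorted CS (fun x => x) false with hcom
  have hEe : common.isEmpty = List.isEmpty CS := by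
    rw [Bool.eq_iff_iff]
    simp [List.isEmpty_iff, hcom, PySem.List.sorted_eq_nil_iff]
  by_cases hE : common.isEmpty
  · have hCSe : List.isEmpty CS = true := by rw [← hEe]; exact hE
    simp [hE, hCSe]
  · have hCSne : ¬(List.isEmpty CS = true) := by rw [← hEe]; exact hE
    rw [if_neg hE, if_neg hCSne]
    have hndC : common.Nodup :=
      (PySem.List.sorted_perm _ _ _).nodup_iff.mpr (PySem.Set.nodup_inter _ _ (PySem.Set.nodup_ofList l))
    have hmem : ∀ n, n ∈ common ↔ (n ∈ l ∧ n ∈ r) := by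
      intro n
      rw [hcom]
      simp [PySem.List.mem_sorted, hCS, PySem.Set.mem_inter, PySem.Set.mem_ofList]
    -- the three sorted literal groups of A
    have g1 : PySem.List.sorted (PySem.Set.ofList ["file_id", "path"]) (fun x => x) false = ["file_id", "path"] := by
      simp [PySem.List.sorted, PySem.List.insertBy, PySem.Set.ofList, PySem.Set.add]
      decide
    have g2 : PySem.List.sorted (PySem.Set.ofList ["bstart", "bend"]) (fun x => x) false = ["bend", "bstart"] := by
      simp [PySem.List.sorted, PySem.List.insertBy, PySem.Set.ofList, PySem.Set.add]
      decide
    have g3 : PySem.List.sorted (PySem.Set.ofList ["symbol", "qname"]) (fun x => x) false = ["qname", "symbol"] := by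
      simp [PySem.List.sorted, PySem.List.insertBy, PySem.Set.ofList, PySem.Set.add]
      decide
    -- A's nested literal-group loop is the flat loop over the six priority names
    have hflat :
        ([PySem.Set.ofList ["file_id", "path"], PySem.Set.ofList ["bstart", "bend"],
            PySem.Set.ofList ["symbol", "qname"]] : List (List String)).foldl
          (fun res group => (PySem.List.sorted group (fun x => x) false).foldl (pvStepPrio l r) res) []
        = (["file_id", "path", "bend", "bstart", "qname", "symbol"] : List String).foldl
            (pvStepPrio l r) [] := by
      simp only [List.foldl_cons, List.foldl_nil, g1, g2, g3]
    have hfp := fold_prio l r (["file_id", "path", "bend", "bstart", "qname", "symbol"]) [] (by decide) (by simp)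
    simp only [hflat, hfp, List.nil_append]
    set prio : List String := ["file_id", "path", "bend", "bstart", "qname", "symbol"] with hprio
    set R0 := (prio.filter (fun n => l.contains n && r.contains n)).map (fun n => (n, n)) with hR0
    rw [fold_dedup common R0 hndC]
    have hf2 : common.filter (fun n => !(R0.contains (n, n)))
        = common.filter (fun n => !(prio.contains n)) := by
      apply List.filter_congr
      intro n hn
      have hpair : ((n, n) ∈ R0) ↔ n ∈ prio := by
        rw [hR0]
        constructor
        · intro h
          rcases List.mem_map.mp h with ⟨m, hm, hmp⟩
          cases hmp
          exact List.mem_of_mem_filter hm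
        · intro h
          refine List.mem_map.mpr ⟨n, List.mem_filter.mpr ⟨h, ?_⟩, rfl⟩
          have := (hmem n).mp hn
          simp [List.contains_eq_mem, this.1, this.2]
      simp [List.contains_eq_mem, hpair]
    have hne : common ≠ [] := fun h => by simp [h] at hE
    obtain ⟨n, hn⟩ := List.exists_mem_of_ne_nil common hne
    have hAne : ¬((R0 ++ (common.filter (fun n => !(R0.contains (n, n)))).map (fun n => (n, n))).isEmpty = true) := by
      rw [List.isEmpty_iff]
      intro h
      rcases List.append_eq_nil_iff.mp h with ⟨h1, h2⟩
      have h3 : (n, n) ∉ R0 := by rw [h1]; simp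
      have h4 : n ∈ common.filter (fun m => !(R0.contains (m, m))) :=
        List.mem_filter.mpr ⟨hn, by simp [List.contains_eq_mem, h3]⟩
      rw [List.map_eq_nil_iff.mp h2] at h4
      simp at h4
    rw [if_neg hAne]
    -- the B side: the initial seven empty buckets, then the distribution loop
    have hinit : (PySem.List.pyRange 0 7 1).map (fun _ => ([] : List (String × String)))
        = [[], [], [], [], [], [], []] := by decide
    rw [hinit, ← hcom, fold_bucket]
    simp only [List.flatten_cons, List.flatten_nil, List.nil_append, List.append_nil]
    rw [hf2, hR0]
    have hf1 : prio.filter (fun n => l.contains n && r.contains n)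
        = prio.filter (fun n => common.contains n) := by
      apply List.filter_congr
      intro n _
      simp [List.contains_eq_mem, hmem n]
    rw [hf1]
    refine congrArg some ?_
    have e0 := filter_beq_nodup common hndC "file_id"
    have e1 := filter_beq_nodup common hndC "path"
    have e2 := filter_beq_nodup common hndC "bend"
    have e3 := filter_beq_nodup common hndC "bstart"
    have e4 := filter_beq_nodup common hndC "qname"
    have e5 := filter_beq_nodup common hndC "symbol"
    rw [hprio]
    simp only [List.filter_cons, List.filter_nil, List.contains_eq_mem, e0, e1, e2, e3, e4, e5]
    by_cases c0 : "file_id" ∈ common <;> by_cases c1 : "path" ∈ common <;>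
      by_cases c2 : "bend" ∈ common <;> by_cases c3 : "bstart" ∈ common <;>
      by_cases c4 : "qname" ∈ common <;> by_cases c5 : "symbol" ∈ common <;>
      simp [c0, c1, c2, c3, c4, c5]
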